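-- pv_equiv track=rewrite | github.com/sakshipatil-ilink/Streamlit_SOW_Validation | rahul_sow_validation_app.py | get_section_summary
-- ===== SOURCE A (Python) =====
-- def get_section_summary(issues):
--     if not issues:
--         return 0, None, ""
--     issue_count = len(issues)
--     severities = [issue.get("severity", "").lower() for issue in issues]
--     if "high" in severities:
--         highest_severity = "high"
--     elif "medium" in severities:
--         highest_severity = "medium"
--     elif "low" in severities:
--         highest_severity = "low"
--     else:
--         highest_severity = None
--
--     # Create summary text
--     if issue_count == 1:
--         summary_text = "1 Point to review"
--     else:
--         summary_text = f"{issue_count} Points to review"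
--
--     return issue_count, highest_severity, summary_text
-- ===== SOURCE B (Python) =====
-- def get_section_summary(issues):
--     if not issues:
--         return 0, None, ""
--     issue_count = len(issues)
--     # single pass: minimum severity rank (high=0, medium=1, low=2, unknown=3)
--     best = 3
--     for issue in issues:
--         s = issue.get("severity", "").lower()
--         r = {"high": 0, "medium": 1, "low": 2}.get(s, 3)
--         if r < best:
--             best = r
--     highest_severity = {0: "high", 1: "medium", 2: "low"}.get(best)
--     if issue_count == 1:
--         summary_text = "1 Point to review"
--     else:
--         summary_text = f"{issue_count} Points to review"
--     return issue_count, highest_severity, summary_text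
-- ===== Notes on version B (the rewrite author's own statement) =====
-- stated objective: alternative
-- what changed: Replaces the severities list build plus three sequential membership scans with a single fold computing the minimum severity rank (high=0, medium=1, low=2, unknown=3), mapped back to its label afterwards.
import Mathlib
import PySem

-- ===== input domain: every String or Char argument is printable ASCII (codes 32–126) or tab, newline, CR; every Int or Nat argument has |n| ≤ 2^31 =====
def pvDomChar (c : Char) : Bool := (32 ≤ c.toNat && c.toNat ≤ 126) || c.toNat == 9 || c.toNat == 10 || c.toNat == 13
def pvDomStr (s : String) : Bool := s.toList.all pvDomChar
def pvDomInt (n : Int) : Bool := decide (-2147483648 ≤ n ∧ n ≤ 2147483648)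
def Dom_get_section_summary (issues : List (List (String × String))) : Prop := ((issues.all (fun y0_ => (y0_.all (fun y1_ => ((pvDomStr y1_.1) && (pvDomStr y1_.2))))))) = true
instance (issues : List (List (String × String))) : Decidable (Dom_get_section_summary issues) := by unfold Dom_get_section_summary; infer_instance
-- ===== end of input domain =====

-- B replaces A's severities list plus three membership scans by one min-rank fold; objective: alternative decomposition.

-- ===== PORT A =====
def get_section_summary (issues : List (List (String × String))) : Int × Option String × String :=
  if issues = [] then (0, none, "")
  else
    let issue_count : Int := PySem.List.len issues
    let severities : List String :=
      issues.map (fun issue => PySem.Str.lower ((PySem.Dict.mk issue).getD "severity" ""))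
    let highest_severity : Option String :=
      if severities.contains "high" then some "high"
      else if severities.contains "medium" then some "medium"
      else if severities.contains "low" then some "low"
      else none
    let summary_text : String :=
      if issue_count = 1 then "1 Point to review"
      else PySem.Int.toStr issue_count ++ " Points to review"
    (issue_count, highest_severity, summary_text)

-- ===== PORT B =====
def get_section_summary_alt (issues : List (List (String × String))) : Int × Option String × String :=
  if issues = [] then (0, none, "")
  else
    let issue_count : Int := PySem.List.len issues
    let best : Int := issues.foldl (fun best issue =>
      let s := PySem.Str.lower ((PySem.Dict.mk issue).getD "severity" "")
      let r := (PySem.Dict.mk [("high", (0 : Int)), ("medium", 1), ("low", 2)]).getD s 3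
      if r < best then r else best) 3
    let highest_severity : Option String :=
      (PySem.Dict.mk [((0 : Int), "high"), (1, "medium"), (2, "low")]).get? best
    let summary_text : String :=
      if issue_count = 1 then "1 Point to review"
      else PySem.Int.toStr issue_count ++ " Points to review"
    (issue_count, highest_severity, summary_text)

-- ===== PRECONDITION & SPEC =====
def Spec_get_section_summary (issues : List (List (String × String))) (out : Int × Option String × String) : Prop := out = get_section_summary_alt issues
instance (issues : List (List (String × String))) (out : Int × Option String × String) : Decidable (Spec_get_section_summary issues out) := by unfold Spec_get_section_summary; infer_instance

-- ===== CLAIM (what is proved, stated in full; the proofs are below) =====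
def Claim_equal_get_section_summary : Prop := ∀ (issues : List (List (String × String))), Dom_get_section_summary issues → Spec_get_section_summary issues (get_section_summary issues)

-- ===== LEMMAS AND PROOFS =====

/-- severity string of one issue, shared subexpression of both ports -/
def pvSev (issue : List (String × String)) : String :=
  PySem.Str.lower ((PySem.Dict.mk issue).getD "severity" "")

/-- B's rank of one severity string -/
def pvRank (s : String) : Int :=
  (PySem.Dict.mk [("high", (0 : Int)), ("medium", 1), ("low", 2)]).getD s 3

/-- the minimum rank A's membership chain encodes -/
def pvM (issues : List (List (String × String))) : Int :=
  if (issues.map pvSev).contains "high" then 0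
  else if (issues.map pvSev).contains "medium" then 1
  else if (issues.map pvSev).contains "low" then 2
  else 3

lemma pvM_bounds (issues : List (List (String × String))) : 0 ≤ pvM issues ∧ pvM issues ≤ 3 := by
  unfold pvM; split_ifs <;> omega

lemma pvRank_eq (s : String) :
    pvRank s = if s = "high" then 0 else if s = "medium" then 1 else if s = "low" then 2 else 3 := by
  unfold pvRank
  by_cases h1 : s = "high"
  · subst h1; rfl
  · by_cases h2 : s = "medium"
    · subst h2; rfl
    · by_cases h3 : s = "low"
      · subst h3; rfl
      · simp [PySem.Dict.getD_eq_get?_getD, h1, h2, h3, PySem.Dict.get?]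
        simp [Ne.symm h1, Ne.symm h2, Ne.symm h3]

lemma pvM_cons (i : List (String × String)) (is : List (List (String × String))) :
    pvM (i :: is) = min (pvRank (pvSev i)) (pvM is) := by
  have hb := pvM_bounds is
  rw [pvRank_eq]
  unfold pvM at hb ⊢
  simp only [List.map_cons, List.contains_cons]
  by_cases h1 : pvSev i = "high"
  · simp [h1]; omega
  · by_cases h2 : pvSev i = "medium"
    · simp [h2]; split_ifs at hb ⊢ <;> omega
    · by_cases h3 : pvSev i = "low"
      · simp [h3]; split_ifs at hb ⊢ <;> omega
      · simp [Ne.symm h1, Ne.symm h2, Ne.symm h3]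
        split_ifs at hb ⊢ <;> omega

def pvStep (best : Int) (issue : List (String × String)) : Int :=
  if pvRank (pvSev issue) < best then pvRank (pvSev issue) else best

lemma pv_fold_eq (issues : List (List (String × String))) :
    ∀ acc : Int, acc ≤ 3 →
    issues.foldl pvStep acc = min acc (pvM issues) := by
  induction issues with
  | nil => intro acc h; unfold pvM; simp; omega
  | cons i is ih =>
    intro acc h
    have hstep : pvStep acc i = min acc (pvRank (pvSev i)) := by
      unfold pvStep; split_ifs <;> omega
    have hrle : pvRank (pvSev i) ≤ 3 := by rw [pvRank_eq]; split_ifs <;> omega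
    simp only [List.foldl_cons, hstep]
    rw [ih _ (by omega), pvM_cons]
    have hb := pvM_bounds is
    omega

lemma pv_label_eq (issues : List (List (String × String))) :
    (PySem.Dict.mk [((0 : Int), "high"), (1, "medium"), (2, "low")]).get? (pvM issues) =
    (if (issues.map pvSev).contains "high" then some "high"
     else if (issues.map pvSev).contains "medium" then some "medium"
     else if (issues.map pvSev).contains "low" then some "low"
     else none) := by
  unfold pvM
  split_ifs <;> rfl

-- ===== VERDICT (by name: the statement is the Claim_ definition above) =====
theorem get_section_summary_spec : Claim_equal_get_section_summary := by
  intro issues _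
  unfold Spec_get_section_summary get_section_summary get_section_summary_alt
  by_cases h : issues = []
  · simp [h]
  · simp only [h, if_false]
    have hfold : issues.foldl (fun best issue =>
        let s := PySem.Str.lower ((PySem.Dict.mk issue).getD "severity" "")
        let r := (PySem.Dict.mk [("high", (0 : Int)), ("medium", 1), ("low", 2)]).getD s 3
        if r < best then r else best) 3 = issues.foldl pvStep 3 := rfl
    rw [hfold, pv_fold_eq issues 3 le_rfl]
    have hb := pvM_bounds issues
    have hmin : min (3 : Int) (pvM issues) = pvM issues := by omega
    rw [hmin, pv_label_eq]
    simp [pvSev]
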